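-- pv_equiv track=rewrite | github.com/heitorchang/learn-code | battles/tourneys/20170414_1145.py | switchLights
-- ===== SOURCE A (Python) =====
-- def switchLights(a):
--     for i in range(len(a)):
--         if a[i] == 1:
--             for j in range(i+1):
--                 if a[j] == 0:
--                     a[j] = 1
--                 else:
--                     a[j] = 0
--
--     return a
-- ===== SOURCE B (Python) =====
-- def switchLights(a):
--     cnt = 0
--     out = []
--     for x in reversed(a):
--         if x == 1:
--             cnt += 1
--         if cnt == 0:
--             y = x
--         elif cnt % 2 == 1:
--             y = 1 if x == 0 else 0
--         else:
--             y = 0 if x == 0 else 1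
--         out.append(y)
--     out.reverse()
--     a[:] = out
--     return a
-- ===== Notes on version B (the rewrite author's own statement) =====
-- stated objective: alternative
-- what changed: Instead of A's left-to-right loop that re-flips the whole prefix at each 1, B makes one right-to-left pass keeping the count of ones seen so far and computes each output cell directly from that count's parity.
import Mathlib
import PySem

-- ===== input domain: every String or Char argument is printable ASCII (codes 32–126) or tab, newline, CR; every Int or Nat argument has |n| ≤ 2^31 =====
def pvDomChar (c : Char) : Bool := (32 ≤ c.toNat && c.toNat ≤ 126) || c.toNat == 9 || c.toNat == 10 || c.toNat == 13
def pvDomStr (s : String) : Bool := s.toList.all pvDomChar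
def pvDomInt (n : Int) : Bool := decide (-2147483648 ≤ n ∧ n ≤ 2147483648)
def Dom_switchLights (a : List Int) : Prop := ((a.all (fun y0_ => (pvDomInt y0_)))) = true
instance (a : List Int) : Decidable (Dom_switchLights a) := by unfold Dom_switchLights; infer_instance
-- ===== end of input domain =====

-- B computes each cell directly from the parity of ones in its suffix, in a single
-- right-to-left pass instead of A's repeated prefix flipping. A mutates its argument in
-- place (B's Python does the same via a[:] = out); the equivalence is about the return value.

-- ===== PORT A =====
-- outer loop: for i in range(len(a)); inner loop flips a[0..i] when a[i] == 1
def switchLights (a : List Int) : List Int :=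
  (List.range a.length).foldl (fun acc i =>
    if acc.getD i 0 = 1 then
      (List.range (i + 1)).foldl (fun acc2 j =>
        if acc2.getD j 0 = 0 then acc2.set j 1 else acc2.set j 0) acc
    else acc) a

-- ===== PORT B =====
-- fold over reversed(a): state = (cnt, out); out reversed at the end
def switchLights_alt (a : List Int) : List Int :=
  (a.reverse.foldl (fun (s : Nat × List Int) x =>
    let cnt := if x = 1 then s.1 + 1 else s.1
    let y : Int :=
      if cnt = 0 then x
      else if cnt % 2 = 1 then (if x = 0 then 1 else 0)
      else (if x = 0 then 0 else 1)
    (cnt, s.2 ++ [y])) ((0 : Nat), ([] : List Int))).2.reverse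

-- ===== PRECONDITION & SPEC =====
def Spec_switchLights (a : List Int) (out : List Int) : Prop := out = switchLights_alt a
instance (a : List Int) (out : List Int) : Decidable (Spec_switchLights a out) := by unfold Spec_switchLights; infer_instance

-- ===== CLAIM (what is proved, stated in full; the proofs are below) =====
def Claim_equal_switchLights : Prop := ∀ (a : List Int), Dom_switchLights a → Spec_switchLights a (switchLights a)

-- ===== LEMMAS AND PROOFS =====

-- single flip, as both programs perform it
def gFlip (x : Int) : Int := if x = 0 then 1 else 0

-- number of ones in a list
def onesIn (l : List Int) : Nat := l.countP (fun x => decide (x = 1))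

-- the common specification: cell j of the result is a[j] flipped once per 1 in a[j..]
def specSL (a : List Int) : List Int :=
  a.mapIdx (fun j x => gFlip^[onesIn (a.drop j)] x)

-- ---------- generic facts about gFlip ----------

theorem gFlip_mem (x : Int) : gFlip x = 0 ∨ gFlip x = 1 := by
  unfold gFlip; split_ifs <;> simp

theorem gFlip_iterate_parity (k : Nat) (b : Int) (hb : b = 0 ∨ b = 1) :
    gFlip^[k] b = if k % 2 = 0 then b else gFlip b := by
  induction k generalizing b with
  | zero => simp
  | succ k ih =>
    rw [Function.iterate_succ_apply, ih (gFlip b) (gFlip_mem b)]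
    have hgg : gFlip (gFlip b) = b := by rcases hb with hb | hb <;> subst hb <;> rfl
    by_cases hk : k % 2 = 0
    · have h1 : ¬ ((k+1) % 2 = 0) := by omega
      simp [hk, h1]
    · have h1 : (k+1) % 2 = 0 := by omega
      simp [hk, h1, hgg]

-- B's branch computes the k-fold flip
theorem yval_eq_iterate (x : Int) (c : Nat) :
    (if c = 0 then x
      else if c % 2 = 1 then (if x = 0 then 1 else 0)
      else (if x = 0 then 0 else 1)) = gFlip^[c] x := by
  rcases c with _ | m
  · simp
  · rw [Function.iterate_succ_apply, gFlip_iterate_parity m (gFlip x) (gFlip_mem x)]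
    have hiff : (m + 1) % 2 = 1 ↔ m % 2 = 0 := by omega
    by_cases hm : m % 2 = 0
    · simp [hiff.mpr hm, hm, gFlip]
    · have h1 : ¬ ((m+1) % 2 = 1) := by omega
      simp only [if_neg (Nat.succ_ne_zero m), if_neg h1, if_neg hm]
      unfold gFlip
      split_ifs <;> simp_all

-- ---------- B equals specSL ----------

-- recursion mirroring B's loop body (output part only)
def goB : List Int → Nat → List Int
  | [], _ => []
  | x :: xs, c =>
    let c' := if x = 1 then c + 1 else c
    gFlip^[c'] x :: goB xs c'

theorem foldB_eq_goB (l : List Int) (c : Nat) (acc : List Int) :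
    (l.foldl (fun (s : Nat × List Int) x =>
      let cnt := if x = 1 then s.1 + 1 else s.1
      let y : Int :=
        if cnt = 0 then x
        else if cnt % 2 = 1 then (if x = 0 then 1 else 0)
        else (if x = 0 then 0 else 1)
      (cnt, s.2 ++ [y])) (c, acc)).2 = acc ++ goB l c := by
  induction l generalizing c acc with
  | nil => simp [goB]
  | cons x xs ih =>
    simp only [List.foldl_cons, goB]
    rw [ih]
    simp [yval_eq_iterate]

theorem onesIn_cons (z : Int) (l : List Int) :
    onesIn (z :: l) = (if z = 1 then 1 else 0) + onesIn l := by
  simp only [onesIn, List.countP_cons]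
  split_ifs <;> simp_all <;> omega

theorem goB_append (l : List Int) (x : Int) (c : Nat) :
    goB (l ++ [x]) c = goB l c ++ [gFlip^[c + onesIn (l ++ [x])] x] := by
  induction l generalizing c with
  | nil =>
    simp only [List.nil_append, goB]
    have hnil : onesIn ([] : List Int) = 0 := by simp [onesIn]
    have h : (if x = 1 then c + 1 else c) = c + onesIn [x] := by
      rw [onesIn_cons, hnil]; split_ifs <;> omega
    rw [h]
  | cons z zs ih =>
    simp only [List.cons_append, goB]
    rw [ih]
    have h : (if z = 1 then c + 1 else c) + onesIn (zs ++ [x])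
         = c + onesIn (z :: (zs ++ [x])) := by
      rw [onesIn_cons]; split_ifs <;> omega
    rw [h]

theorem alt_eq_spec (a : List Int) : switchLights_alt a = specSL a := by
  unfold switchLights_alt
  rw [foldB_eq_goB]
  simp only [List.nil_append]
  induction a with
  | nil => simp [goB, specSL]
  | cons x xs ih =>
    rw [List.reverse_cons, goB_append, List.reverse_append]
    have hones : onesIn (xs.reverse ++ [x]) = onesIn (x :: xs) := by
      simp only [onesIn, List.countP_append, List.countP_reverse, List.countP_cons,
        List.countP_nil]
      split_ifs <;> omega
    rw [hones]
    simp only [List.reverse_singleton, List.singleton_append, Nat.zero_add]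
    rw [ih]
    unfold specSL
    rw [List.mapIdx_cons]
    simp

-- ---------- A equals specSL ----------

-- state after the outer loop has run for i = 0 .. i-1
def mixSL (a : List Int) (i : Nat) : List Int :=
  a.mapIdx (fun j x => gFlip^[onesIn ((a.take i).drop j)] x)

-- one iteration of the inner loop, written as a single set
theorem step_eq (acc : List Int) (j : Nat) :
    (if acc.getD j 0 = 0 then acc.set j 1 else acc.set j 0)
      = acc.set j (gFlip (acc.getD j 0)) := by
  unfold gFlip; split_ifs <;> rfl

theorem set_flip_eq (acc : List Int) (j : Nat) (hj : j < acc.length) :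
    acc.set j (gFlip (acc.getD j 0))
      = acc.mapIdx (fun k x => if k = j then gFlip x else x) := by
  apply List.ext_getElem
  · simp
  · intro n h1 h2
    simp only [List.getElem_set, List.getElem_mapIdx]
    by_cases h : j = n
    · subst h; simp [List.getElem?_eq_getElem hj, List.getD]
    · have h2 : ¬ (n = j) := fun hh => h hh.symm
      simp [h, h2]

-- the inner loop flips every cell of the prefix 0..i
theorem innerF_eq (acc : List Int) (i : Nat) (hi : i < acc.length) :
    (List.range (i + 1)).foldl (fun acc2 j =>
        if acc2.getD j 0 = 0 then acc2.set j 1 else acc2.set j 0) acc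
      = acc.mapIdx (fun j x => if j ≤ i then gFlip x else x) := by
  induction i with
  | zero =>
    show (if acc.getD 0 0 = 0 then acc.set 0 1 else acc.set 0 0) = _
    rw [step_eq, set_flip_eq acc 0 hi]
    apply List.ext_getElem
    · simp
    · intro n h1 h2
      simp [List.getElem_mapIdx]
  | succ m ih =>
    have hm : m < acc.length := by omega
    rw [List.range_succ, List.foldl_append, ih hm]
    simp only [List.foldl_cons, List.foldl_nil]
    rw [step_eq, set_flip_eq _ (m+1) (by simp; omega)]
    apply List.ext_getElem
    · simp
    · intro n h1 h2
      have hn : n < acc.length := by simpa using h2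
      simp only [List.getElem_mapIdx]
      rcases Nat.lt_trichotomy n (m+1) with h | h | h
      · have h1' : n ≤ m := by omega
        have h2' : n ≤ m + 1 := by omega
        have h3' : ¬ (n = m + 1) := by omega
        simp [h1', h2', h3']
      · subst h
        simp
      · have h1' : ¬ (n ≤ m) := by omega
        have h2' : ¬ (n ≤ m + 1) := by omega
        have h3' : ¬ (n = m + 1) := by omega
        simp [h1', h2', h3']

theorem mix_getD (a : List Int) (i : Nat) (hi : i < a.length) :
    (mixSL a i).getD i 0 = a[i]'hi := by
  unfold mixSL
  rw [List.getD_eq_getElem _ 0 (by simpa using hi)]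
  have hdrop : (a.take i).drop i = [] := by
    apply List.drop_eq_nil_of_le; simp
  simp [List.getElem_mapIdx, hdrop, onesIn]

theorem onesIn_take_succ (a : List Int) (i j : Nat) (hi : i < a.length) (hj : j ≤ i) :
    onesIn ((a.take (i+1)).drop j)
      = onesIn ((a.take i).drop j) + (if a[i]'hi = 1 then 1 else 0) := by
  rw [List.take_succ_eq_append_getElem hi,
      List.drop_append_of_le_length (by simp; omega)]
  simp only [onesIn, List.countP_append, List.countP_cons, List.countP_nil]
  split_ifs <;> simp_all

theorem onesIn_take_high (a : List Int) (i j : Nat) (hij : i ≤ j) :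
    onesIn ((a.take i).drop j) = 0 := by
  have h : (a.take i).drop j = [] := by
    apply List.drop_eq_nil_of_le; simp; omega
  simp [h, onesIn]

theorem outer_eq (a : List Int) (i : Nat) (hi : i ≤ a.length) :
    (List.range i).foldl (fun acc k =>
      if acc.getD k 0 = 1 then
        (List.range (k + 1)).foldl (fun acc2 j =>
          if acc2.getD j 0 = 0 then acc2.set j 1 else acc2.set j 0) acc
      else acc) a = mixSL a i := by
  induction i with
  | zero =>
    simp only [List.range_zero, List.foldl_nil]
    apply List.ext_getElem
    · simp [mixSL]
    · intro n h1 h2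
      simp [mixSL, List.getElem_mapIdx, onesIn]
  | succ m ih =>
    have hm : m < a.length := by omega
    rw [List.range_succ, List.foldl_append, ih (by omega)]
    simp only [List.foldl_cons, List.foldl_nil]
    rw [mix_getD a m hm]
    by_cases hv : a[m]'hm = 1
    · rw [if_pos hv, innerF_eq _ m (by simp [mixSL]; omega)]
      apply List.ext_getElem
      · simp [mixSL]
      · intro n h1 h2
        have hn : n < a.length := by simp [mixSL] at h2; omega
        simp only [mixSL, List.getElem_mapIdx]
        by_cases hnm : n ≤ m
        · rw [if_pos hnm, onesIn_take_succ a m n hm hnm, if_pos hv,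
              ← Function.iterate_succ_apply' gFlip]
        · rw [if_neg hnm, onesIn_take_high a (m+1) n (by omega),
              onesIn_take_high a m n (by omega)]
    · rw [if_neg hv]
      apply List.ext_getElem
      · simp [mixSL]
      · intro n h1 h2
        have hn : n < a.length := by simp [mixSL] at h2; omega
        simp only [mixSL, List.getElem_mapIdx]
        by_cases hnm : n ≤ m
        · rw [onesIn_take_succ a m n hm hnm, if_neg hv, Nat.add_zero]
        · rw [onesIn_take_high a (m+1) n (by omega),
              onesIn_take_high a m n (by omega)]

theorem a_eq_spec (a : List Int) : switchLights a = specSL a := by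
  unfold switchLights
  rw [outer_eq a a.length (le_refl _)]
  unfold mixSL specSL
  rw [List.take_length]

-- ===== VERDICT (by name: the statement is the Claim_ definition above) =====
theorem switchLights_spec : Claim_equal_switchLights := by
  intro a _
  unfold Spec_switchLights
  rw [a_eq_spec, alt_eq_spec]
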